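-- pv_equiv track=rewrite | github.com/Danny-proton/AgentBus | auto_reply/command_detection.py | _is_abort_trigger
-- ===== SOURCE A (Python) =====
-- def _is_abort_trigger(text: str) -> bool:
--     """
--     检查是否是中止触发器
--
--     Args:
--         text: 要检查的文本
--
--     Returns:
--         是否是中止触发器
--     """
--     abort_triggers = [
--         "/abort",
--         "/stop",
--         "/cancel",
--         "/halt",
--     ]
--
--     normalized = text.strip().lower()
--
--     # 精确匹配
--     if normalized in abort_triggers:
--         return True
--
--     # 检查是否是带参数的中止命令
--     for trigger in abort_triggers:
--         if normalized.startswith(trigger + " "):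
--             return True
--
--     return False
-- ===== SOURCE B (Python) =====
-- def _is_abort_trigger(text: str) -> bool:
--     """Check whether text is an abort command trigger (exact or with arguments)."""
--     normalized = text.strip().lower()
--     i = normalized.find(" ")
--     first = normalized if i < 0 else normalized[:i]
--     return first in ("/abort", "/stop", "/cancel", "/halt")
-- ===== Notes on version B (the rewrite author's own statement) =====
-- stated objective: simpler
-- what changed: B extracts the first space-delimited token of the normalized text once (find + slice) and does a single membership test against the four triggers, instead of A's exact-match check followed by a loop of per-trigger prefix tests.
import Mathlib
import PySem

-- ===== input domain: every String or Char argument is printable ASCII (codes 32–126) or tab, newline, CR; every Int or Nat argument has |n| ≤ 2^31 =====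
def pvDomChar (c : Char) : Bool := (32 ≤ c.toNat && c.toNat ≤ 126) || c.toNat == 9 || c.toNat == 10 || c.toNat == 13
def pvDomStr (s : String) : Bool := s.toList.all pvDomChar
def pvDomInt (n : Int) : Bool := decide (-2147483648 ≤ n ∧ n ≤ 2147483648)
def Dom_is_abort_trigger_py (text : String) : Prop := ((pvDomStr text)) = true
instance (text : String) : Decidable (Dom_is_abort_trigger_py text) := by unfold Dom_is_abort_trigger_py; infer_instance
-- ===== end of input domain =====

-- B replaces A's exact-match check plus loop of startswith tests by extracting the
-- first space-delimited token once and doing a single membership test (objective: simpler).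

-- ===== PORT A =====
def is_abort_trigger_py (text : String) : Bool :=
  let abort_triggers : List String := ["/abort", "/stop", "/cancel", "/halt"]
  let normalized := PySem.Str.lower (PySem.Str.strip text)
  if abort_triggers.contains normalized then true
  else abort_triggers.any (fun trigger => PySem.Str.startswith normalized (trigger ++ " "))

-- ===== PORT B =====
def is_abort_trigger_py_alt (text : String) : Bool :=
  let normalized := PySem.Str.lower (PySem.Str.strip text)
  let i := PySem.Str.find normalized " "
  let first := if i < 0 then normalized else PySem.Str.slice normalized none (some i)
  ["/abort", "/stop", "/cancel", "/halt"].contains first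

-- ===== PRECONDITION & SPEC =====
def Spec_is_abort_trigger_py (text : String) (out : Bool) : Prop := out = is_abort_trigger_py_alt text
instance (text : String) (out : Bool) : Decidable (Spec_is_abort_trigger_py text out) := by unfold Spec_is_abort_trigger_py; infer_instance

-- ===== CLAIM (what is proved, stated in full; the proofs are below) =====
def Claim_equal_is_abort_trigger_py : Prop := ∀ (text : String), Dom_is_abort_trigger_py text → Spec_is_abort_trigger_py text (is_abort_trigger_py text)

-- ===== LEMMAS AND PROOFS =====

-- Python's find for a single space: index of the first space, or -1.
theorem find_go_space (l : List Char) (k : Nat) :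
    PySem.Chars.find.go [' '] l k =
      if ' ' ∈ l then ((k + (l.takeWhile (· != ' ')).length : Nat) : Int) else -1 := by
  induction l generalizing k with
  | nil => simp [PySem.Chars.find.go]
  | cons c r ih =>
    by_cases hc : c = ' '
    · subst hc
      simp [PySem.Chars.find.go, List.isPrefixOf]
    · have hpc : (c != ' ') = true := by simp [hc]
      have hpre : [' '].isPrefixOf (c :: r) = false := by
        rw [List.isPrefixOf]
        simp only [List.isPrefixOf, Bool.and_eq_false_iff, beq_eq_false_iff_ne, ne_eq]
        exact Or.inl (Ne.symm hc)
      rw [show PySem.Chars.find.go [' '] (c :: r) k =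
            if [' '].isPrefixOf (c :: r) = true then (k : Int)
            else PySem.Chars.find.go [' '] r (k + 1) from rfl]
      rw [hpre]
      simp only [Bool.false_eq_true, if_false, ih]
      have hmem : (' ' ∈ c :: r) ↔ (' ' ∈ r) := by
        have h' : ¬ (' ' = c) := fun h => hc h.symm
        simp [List.mem_cons, h']
      have htw : (c :: r).takeWhile (· != ' ') = c :: r.takeWhile (· != ' ') := by
        rw [List.takeWhile_cons, if_pos hpc]
      by_cases h : ' ' ∈ r
      · simp only [h, hmem, if_true, htw, List.length_cons]
        push_cast; omega
      · simp [h, hmem]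

-- takeWhile characterises "equals t or starts with t followed by a space", for a space-free t.
theorem trig (t : List Char) (ht : ' ' ∉ t) (l : List Char) :
    (l = t ∨ (t ++ [' ']) <+: l) ↔ l.takeWhile (· != ' ') = t := by
  induction t generalizing l with
  | nil =>
    cases l with
    | nil => simp
    | cons c r =>
      by_cases hc : c = ' '
      · subst hc
        simp [List.cons_prefix_cons]
      · have hpc : (c != ' ') = true := by simp [hc]
        rw [List.takeWhile_cons, if_pos hpc]
        simp [List.cons_prefix_cons, Ne.symm hc]
  | cons a t' ih =>
    have ha : a ≠ ' ' := fun h => ht (h ▸ List.mem_cons_self)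
    have ht' : ' ' ∉ t' := fun h => ht (List.mem_cons_of_mem _ h)
    cases l with
    | nil => simp [List.takeWhile]
    | cons c r =>
      by_cases hc : c = ' '
      · subst hc
        have hpc : ((' ' : Char) != ' ') = false := by simp
        rw [List.takeWhile_cons, if_neg (by simp)]
        simp only [List.cons_append, List.cons_prefix_cons, List.cons.injEq]
        constructor
        · rintro (⟨h1, _⟩ | ⟨h1, _⟩) <;>
            first
            | exact absurd h1 ha
            | exact absurd h1.symm ha
        · intro h; exact absurd h.symm (by simp)
      · have hpc : (c != ' ') = true := by simp [hc]
        rw [List.takeWhile_cons, if_pos hpc]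
        simp only [List.cons_append, List.cons_prefix_cons, List.cons.injEq]
        constructor
        · rintro (⟨h1, h2⟩ | ⟨h1, h2⟩)
          · refine ⟨h1, ?_⟩
            rw [h2]
            exact (ih ht' t').mp (Or.inl rfl)
          · exact ⟨h1.symm, (ih ht' r).mp (Or.inr h2)⟩
        · rintro ⟨h1, h2⟩
          rcases (ih ht' r).mpr h2 with h3 | h3
          · exact Or.inl ⟨h1, h3⟩
          · exact Or.inr ⟨h1.symm, h3⟩

-- B's "first" is the prefix of normalized before the first space.
theorem first_toList (n : String) :
    (if PySem.Str.find n " " < 0 then n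
     else PySem.Str.slice n none (some (PySem.Str.find n " "))).toList
      = n.toList.takeWhile (· != ' ') := by
  have hfind : PySem.Str.find n " " =
      if ' ' ∈ n.toList then (((n.toList.takeWhile (· != ' ')).length : Nat) : Int) else -1 := by
    rw [PySem.Str.find_eq]
    show PySem.Chars.find.go (" ".toList) n.toList 0 = _
    rw [show (" ".toList) = [' '] from rfl, find_go_space]
    simp
  by_cases hmem : ' ' ∈ n.toList
  · rw [hfind]
    simp only [hmem, if_true]
    rw [if_neg (by omega)]
    rw [PySem.Str.toList_slice]
    show PySem.List.slice n.toList none (some _) = _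
    rw [PySem.List.slice_to _ (by omega)]
    rw [Int.toNat_natCast]
    exact ((List.prefix_iff_eq_take).mp (List.takeWhile_prefix _)).symm
  · rw [hfind]
    simp only [hmem, if_false, if_pos (by norm_num : (-1 : Int) < 0)]
    symm
    rw [List.takeWhile_eq_self_iff]
    intro c hcmem
    simp only [bne_iff_ne, ne_eq]
    exact fun h => hmem (h ▸ hcmem)

-- per-trigger: A's two checks for trigger t collapse to first-token equality.
theorem perTrig (t n first : String) (ht : ' ' ∉ t.toList)
    (hfirst : first.toList = n.toList.takeWhile (· != ' '))
    : ((n == t) || PySem.Str.startswith n (t ++ " ")) = (first == t) := by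
  rw [Bool.eq_iff_iff]
  simp only [Bool.or_eq_true, beq_iff_eq]
  rw [PySem.Str.startswith_eq, PySem.Chars.startswith_iff]
  rw [show (t ++ " ").toList = t.toList ++ [' '] by simp]
  constructor
  · intro h
    apply String.toList_injective
    rw [hfirst]
    refine (trig t.toList ht n.toList).mp ?_
    rcases h with h | h
    · exact Or.inl (by rw [h])
    · exact Or.inr h
  · intro h
    have h2 := (trig t.toList ht n.toList).mpr (by rw [← hfirst, h])
    rcases h2 with h2 | h2
    · exact Or.inl (String.toList_injective h2)
    · exact Or.inr h2

-- pure Bool regrouping of the four per-trigger disjuncts.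
theorem bool_shuffle (a1 a2 a3 a4 s1 s2 s3 s4 : Bool) :
    ((a1 || (a2 || (a3 || a4))) || (s1 || (s2 || (s3 || s4))))
      = ((a1 || s1) || ((a2 || s2) || ((a3 || s3) || (a4 || s4)))) := by
  cases a1 <;> cases a2 <;> cases a3 <;> cases a4 <;>
    cases s1 <;> cases s2 <;> cases s3 <;> cases s4 <;> rfl

-- ===== VERDICT (by name: the statement is the Claim_ definition above) =====
theorem is_abort_trigger_py_spec : Claim_equal_is_abort_trigger_py := by
  intro text _
  unfold Spec_is_abort_trigger_py is_abort_trigger_py is_abort_trigger_py_alt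
  simp only []
  set n := PySem.Str.lower (PySem.Str.strip text) with hn
  set first := (if PySem.Str.find n " " < 0 then n
     else PySem.Str.slice n none (some (PySem.Str.find n " "))) with hf
  have hfirst : first.toList = n.toList.takeWhile (· != ' ') := first_toList n
  have hcont : ∀ m : String, (["/abort", "/stop", "/cancel", "/halt"] : List String).contains m
      = ((m == "/abort") || ((m == "/stop") || ((m == "/cancel") || (m == "/halt")))) := by
    intro m
    simp only [List.contains, List.elem]
    cases m == "/abort" <;> cases m == "/stop" <;> cases m == "/cancel" <;>
      cases m == "/halt" <;> rfl
  have hany : (["/abort", "/stop", "/cancel", "/halt"] : List String).any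
        (fun trigger => PySem.Str.startswith n (trigger ++ " "))
      = (PySem.Str.startswith n ("/abort" ++ " ") ||
          (PySem.Str.startswith n ("/stop" ++ " ") ||
            (PySem.Str.startswith n ("/cancel" ++ " ") ||
              PySem.Str.startswith n ("/halt" ++ " ")))) := by
    simp [List.any]
  have hif : (if (["/abort", "/stop", "/cancel", "/halt"] : List String).contains n then true
        else (["/abort", "/stop", "/cancel", "/halt"] : List String).any
          (fun trigger => PySem.Str.startswith n (trigger ++ " ")))
      = ((["/abort", "/stop", "/cancel", "/halt"] : List String).contains n
          || (["/abort", "/stop", "/cancel", "/halt"] : List String).any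
            (fun trigger => PySem.Str.startswith n (trigger ++ " "))) := by
    by_cases hb : (["/abort", "/stop", "/cancel", "/halt"] : List String).contains n = true
    · rw [if_pos hb, hb, Bool.true_or]
    · rw [if_neg hb, Bool.eq_false_iff.mpr hb, Bool.false_or]
  rw [hif, hcont n, hany, hcont first, bool_shuffle]
  rw [perTrig "/abort" n first (by decide) hfirst,
      perTrig "/stop" n first (by decide) hfirst,
      perTrig "/cancel" n first (by decide) hfirst,
      perTrig "/halt" n first (by decide) hfirst]
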